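-- pv_equiv track=rewrite | github.com/aurielia/aurielia-vegayanta_230103127_pemograman-python | soal_4.py | jadwal_hari
-- ===== SOURCE A (Python) =====
-- def jadwal_hari(hari):
--     """
--     Menampilkan jadwal kuliah berdasarkan hari.
--
--     Pencarian dilakukan dengan mengecek satu per satu isi list dictionary
--     untuk menemukan jadwal yang sesuai dengan hari yang diminta.
--     """
--     jadwal = [
--         {"hari": "Senin", "mata_kuliah": "Pemrograman Python", "waktu": "08:00-10:00"},
--         {"hari": "Senin", "mata_kuliah": "Basis Data", "waktu": "10:00-12:00"},
--         {"hari": "Selasa", "mata_kuliah": "Jaringan Komputer", "waktu": "13:00-15:00"},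
--         {"hari": "Rabu", "mata_kuliah": "Algoritma", "waktu": "09:00-11:00"},
--         {"hari": "Kamis", "mata_kuliah": "Sistem Operasi", "waktu": "14:00-16:00"},
--         {"hari": "Jumat", "mata_kuliah": "Matematika Diskrit", "waktu": "10:00-12:00"}
--     ]
--
--     hasil = []
--     for item in jadwal:
--         if item["hari"].lower() == hari.lower():
--             hasil.append(item)
--
--     return hasil
-- ===== SOURCE B (Python) =====
-- _JADWAL_PER_HARI = {
--     "senin": [
--         {"hari": "Senin", "mata_kuliah": "Pemrograman Python", "waktu": "08:00-10:00"},
--         {"hari": "Senin", "mata_kuliah": "Basis Data", "waktu": "10:00-12:00"},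
--     ],
--     "selasa": [
--         {"hari": "Selasa", "mata_kuliah": "Jaringan Komputer", "waktu": "13:00-15:00"},
--     ],
--     "rabu": [
--         {"hari": "Rabu", "mata_kuliah": "Algoritma", "waktu": "09:00-11:00"},
--     ],
--     "kamis": [
--         {"hari": "Kamis", "mata_kuliah": "Sistem Operasi", "waktu": "14:00-16:00"},
--     ],
--     "jumat": [
--         {"hari": "Jumat", "mata_kuliah": "Matematika Diskrit", "waktu": "10:00-12:00"},
--     ],
-- }
--
-- def jadwal_hari(hari):
--     """Jadwal sudah dikelompokkan per hari dalam tabel konstan;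
--     hasil diambil dengan satu lookup (kunci tak ada -> list kosong)."""
--     return list(_JADWAL_PER_HARI.get(hari.lower(), []))
-- ===== Notes on version B (the rewrite author's own statement) =====
-- stated objective: alternative
-- what changed: B replaces A's per-call filter scan over the schedule list with a precomputed constant table keyed by lowercased day, answered by a single dict lookup with empty-list default (no loop at call time).
import Mathlib
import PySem

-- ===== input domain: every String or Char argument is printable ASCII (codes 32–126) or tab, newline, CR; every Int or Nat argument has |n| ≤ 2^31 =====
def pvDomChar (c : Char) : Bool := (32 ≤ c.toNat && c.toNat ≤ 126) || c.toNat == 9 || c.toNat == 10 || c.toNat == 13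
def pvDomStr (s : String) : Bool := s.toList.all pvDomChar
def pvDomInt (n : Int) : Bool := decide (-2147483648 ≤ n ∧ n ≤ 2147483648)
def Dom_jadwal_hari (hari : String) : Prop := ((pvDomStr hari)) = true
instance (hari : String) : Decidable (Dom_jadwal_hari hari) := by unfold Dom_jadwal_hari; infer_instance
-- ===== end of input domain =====

-- B replaces A's per-call filter scan with a constant table already grouped by
-- lowercased day, answered by one keyed lookup (objective: alternative decomposition).

-- ===== PORT A =====
-- the fixed schedule list of A; each dict is an association list in insertion order
def pvJadwal : List (List (String × String)) :=
  [ [("hari", "Senin"), ("mata_kuliah", "Pemrograman Python"), ("waktu", "08:00-10:00")],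
    [("hari", "Senin"), ("mata_kuliah", "Basis Data"), ("waktu", "10:00-12:00")],
    [("hari", "Selasa"), ("mata_kuliah", "Jaringan Komputer"), ("waktu", "13:00-15:00")],
    [("hari", "Rabu"), ("mata_kuliah", "Algoritma"), ("waktu", "09:00-11:00")],
    [("hari", "Kamis"), ("mata_kuliah", "Sistem Operasi"), ("waktu", "14:00-16:00")],
    [("hari", "Jumat"), ("mata_kuliah", "Matematika Diskrit"), ("waktu", "10:00-12:00")] ]

-- item["hari"]: first-match lookup; every schedule item has the key, so getD "" is exact here
def pvHariOf (item : List (String × String)) : String :=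
  (PySem.Dict.mk item).getD "hari" ""

def jadwal_hari (hari : String) : List (List (String × String)) :=
  pvJadwal.foldl
    (fun hasil item =>
      if PySem.Str.lower (pvHariOf item) == PySem.Str.lower hari then hasil ++ [item]
      else hasil)
    []

-- ===== PORT B =====
-- the constant table of Source B, already grouped by lowercased day
def pvTabel : PySem.Dict String (List (List (String × String))) :=
  PySem.Dict.mk
    [ ("senin",
        [ [("hari", "Senin"), ("mata_kuliah", "Pemrograman Python"), ("waktu", "08:00-10:00")],
          [("hari", "Senin"), ("mata_kuliah", "Basis Data"), ("waktu", "10:00-12:00")] ]),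
      ("selasa",
        [ [("hari", "Selasa"), ("mata_kuliah", "Jaringan Komputer"), ("waktu", "13:00-15:00")] ]),
      ("rabu",
        [ [("hari", "Rabu"), ("mata_kuliah", "Algoritma"), ("waktu", "09:00-11:00")] ]),
      ("kamis",
        [ [("hari", "Kamis"), ("mata_kuliah", "Sistem Operasi"), ("waktu", "14:00-16:00")] ]),
      ("jumat",
        [ [("hari", "Jumat"), ("mata_kuliah", "Matematika Diskrit"), ("waktu", "10:00-12:00")] ]) ]

def jadwal_hari_alt (hari : String) : List (List (String × String)) :=
  pvTabel.getD (PySem.Str.lower hari) []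

-- ===== PRECONDITION & SPEC =====
def Spec_jadwal_hari (hari : String) (out : List (List (String × String))) : Prop := out = jadwal_hari_alt hari
instance (hari : String) (out : List (List (String × String))) : Decidable (Spec_jadwal_hari hari out) := by unfold Spec_jadwal_hari; infer_instance

-- ===== CLAIM (what is proved, stated in full; the proofs are below) =====
def Claim_equal_jadwal_hari : Prop := ∀ (hari : String), Dom_jadwal_hari hari → Spec_jadwal_hari hari (jadwal_hari hari)

-- ===== LEMMAS AND PROOFS =====

-- both ports depend on hari only through t = hari.lower(); pointwise in t they agree
theorem pv_core (t : String) :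
    pvJadwal.foldl
      (fun hasil item =>
        if PySem.Str.lower (pvHariOf item) == t then hasil ++ [item] else hasil) [] =
    pvTabel.getD t [] := by
  have l1 : PySem.Str.lower (pvHariOf [("hari", "Senin"), ("mata_kuliah", "Pemrograman Python"), ("waktu", "08:00-10:00")]) = "senin" := by decide
  have l2 : PySem.Str.lower (pvHariOf [("hari", "Senin"), ("mata_kuliah", "Basis Data"), ("waktu", "10:00-12:00")]) = "senin" := by decide
  have l3 : PySem.Str.lower (pvHariOf [("hari", "Selasa"), ("mata_kuliah", "Jaringan Komputer"), ("waktu", "13:00-15:00")]) = "selasa" := by decide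
  have l4 : PySem.Str.lower (pvHariOf [("hari", "Rabu"), ("mata_kuliah", "Algoritma"), ("waktu", "09:00-11:00")]) = "rabu" := by decide
  have l5 : PySem.Str.lower (pvHariOf [("hari", "Kamis"), ("mata_kuliah", "Sistem Operasi"), ("waktu", "14:00-16:00")]) = "kamis" := by decide
  have l6 : PySem.Str.lower (pvHariOf [("hari", "Jumat"), ("mata_kuliah", "Matematika Diskrit"), ("waktu", "10:00-12:00")]) = "jumat" := by decide
  simp only [pvJadwal, List.foldl, l1, l2, l3, l4, l5, l6]
  by_cases h1 : ("senin" : String) = t <;>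
  by_cases h2 : ("selasa" : String) = t <;>
  by_cases h3 : ("rabu" : String) = t <;>
  by_cases h4 : ("kamis" : String) = t <;>
  by_cases h5 : ("jumat" : String) = t <;>
    simp_all [pvTabel, PySem.Dict.getD, PySem.Dict.get?]
  all_goals (first
    | exact absurd (h1.trans h2.symm) (by decide)
    | exact absurd (h1.trans h3.symm) (by decide)
    | exact absurd (h1.trans h4.symm) (by decide)
    | exact absurd (h1.trans h5.symm) (by decide)
    | exact absurd (h2.trans h3.symm) (by decide)
    | exact absurd (h2.trans h4.symm) (by decide)
    | exact absurd (h2.trans h5.symm) (by decide)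
    | exact absurd (h3.trans h4.symm) (by decide)
    | exact absurd (h3.trans h5.symm) (by decide)
    | exact absurd (h4.trans h5.symm) (by decide))

-- ===== VERDICT (by name: the statement is the Claim_ definition above) =====
theorem jadwal_hari_spec : Claim_equal_jadwal_hari := by
  intro hari _
  unfold Spec_jadwal_hari jadwal_hari jadwal_hari_alt
  exact pv_core (PySem.Str.lower hari)
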